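-- pv_equiv track=rewrite | github.com/joeyvu/MessagingPlatform | hangman_helper.py | censor
-- ===== SOURCE A (Python) =====
-- def censor(word):
--     ''' Returns a censored quote'''
--     word_list = list(word)
--     index = 0
--     space = " "
--     for char in word_list:
--         if char is not space:
--             word_list[index] = "X"
--         index += 1
--
--     word_list = ''.join(word_list)
--     return word_list
-- ===== SOURCE B (Python) =====
-- def censor(word):
--     ''' Returns a censored quote'''
--     return ' '.join('X' * len(seg) for seg in word.split(' '))
-- ===== Notes on version B (the rewrite author's own statement) =====
-- stated objective: faster
-- what changed: Replaced A's indexed char-by-char in-place overwrite loop by splitting the string on the space character, mapping each segment to a run of 'X' of equal length, and rejoining; the per-character Python-level work disappears into C-level split/join/repeat.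
import Mathlib
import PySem

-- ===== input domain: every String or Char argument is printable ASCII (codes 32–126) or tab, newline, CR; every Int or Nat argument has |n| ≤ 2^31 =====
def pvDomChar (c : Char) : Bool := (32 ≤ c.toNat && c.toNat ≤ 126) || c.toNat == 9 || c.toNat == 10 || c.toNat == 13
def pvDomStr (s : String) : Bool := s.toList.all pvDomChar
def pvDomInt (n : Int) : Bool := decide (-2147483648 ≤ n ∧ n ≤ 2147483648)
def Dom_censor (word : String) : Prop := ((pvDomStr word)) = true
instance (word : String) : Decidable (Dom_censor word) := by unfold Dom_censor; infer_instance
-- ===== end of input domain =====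

-- B replaces A's indexed in-place loop by split-on-space / rejoin: each space-delimited
-- segment becomes a run of 'X' of the same length (measured faster at a timing run's largest size).

-- ===== PORT A =====
-- A walks the char list, overwriting every non-space char (at its index) with 'X';
-- the overwrite of position `index` is exactly a per-element replacement, so the loop
-- is this structural recursion over the same list.
def censorGo : List Char → List Char
  | [] => []
  | c :: rest => (if !(c == ' ') then 'X' else c) :: censorGo rest

def censor (word : String) : String := String.ofList (censorGo word.toList)

-- ===== PORT B =====
def censor_alt (word : String) : String :=
  String.ofList (PySem.Chars.join [' ']
    ((PySem.Chars.splitOn word.toList [' ']).map (fun seg => List.replicate seg.length 'X')))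

-- ===== PRECONDITION & SPEC =====
def Spec_censor (word : String) (out : String) : Prop := out = censor_alt word
instance (word : String) (out : String) : Decidable (Spec_censor word out) := by unfold Spec_censor; infer_instance

-- ===== CLAIM (what is proved, stated in full; the proofs are below) =====
def Claim_equal_censor : Prop := ∀ (word : String), Dom_censor word → Spec_censor word (censor word)

-- ===== LEMMAS AND PROOFS =====

-- fuel-free description of PySem.Chars.splitOn on the single-char separator ' '
def splitAux : List Char → List Char → List (List Char)
  | [], cur => [cur.reverse]
  | c :: rest, cur => if c == ' ' then cur.reverse :: splitAux rest [] else splitAux rest (c :: cur)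

theorem splitOn_go_spec (l cur : List Char) (accs : List (List Char)) (fuel : Nat)
    (h : l.length < fuel) :
    PySem.Chars.splitOn.go [' '] fuel l cur accs = accs.reverse ++ splitAux l cur := by
  induction fuel generalizing l cur accs with
  | zero => omega
  | succ n ih =>
    cases l with
    | nil => simp [PySem.Chars.splitOn.go, splitAux]
    | cons c rest =>
      by_cases hc : c = ' '
      · rw [show PySem.Chars.splitOn.go [' '] (n+1) (c :: rest) cur accs
              = PySem.Chars.splitOn.go [' '] n rest [] (cur.reverse :: accs) by
            simp [PySem.Chars.splitOn.go, List.isPrefixOf, hc]]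
        rw [ih _ _ _ (by simp at h; omega)]
        simp [splitAux, hc]
      · rw [show PySem.Chars.splitOn.go [' '] (n+1) (c :: rest) cur accs
              = PySem.Chars.splitOn.go [' '] n rest (c :: cur) accs by
            simp [PySem.Chars.splitOn.go, List.isPrefixOf, Ne.symm hc]]
        rw [ih _ _ _ (by simp at h; omega)]
        simp [splitAux, hc]

theorem splitOn_eq_splitAux (cs : List Char) :
    PySem.Chars.splitOn cs [' '] = splitAux cs [] := by
  unfold PySem.Chars.splitOn
  rw [splitOn_go_spec _ _ _ _ (Nat.lt_succ_self _)]
  simp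

theorem splitAux_ne_nil (cs cur : List Char) : splitAux cs cur ≠ [] := by
  induction cs generalizing cur with
  | nil => simp [splitAux]
  | cons c rest ih =>
    simp only [splitAux]
    split
    · simp
    · exact ih _

theorem join_splitAux (cs cur : List Char) :
    PySem.Chars.join [' ']
      ((splitAux cs cur).map (fun seg => List.replicate seg.length 'X')) =
    List.replicate cur.length 'X' ++ censorGo cs := by
  induction cs generalizing cur with
  | nil => simp [splitAux, censorGo, PySem.Chars.join_singleton]
  | cons c rest ih =>
    by_cases hc : c = ' '
    · simp only [splitAux, hc, beq_self_eq_true, if_pos, List.map_cons]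
      cases h : (splitAux rest []).map (fun seg => List.replicate seg.length 'X') with
      | nil => exact absurd (List.map_eq_nil_iff.mp h) (splitAux_ne_nil rest [])
      | cons y ys =>
        rw [PySem.Chars.join_cons_cons, ← h, ih ([] : List Char)]
        simp [censorGo]
    · simp only [splitAux, beq_iff_eq, hc, if_neg, not_false_iff]
      rw [ih (c :: cur)]
      simp only [censorGo, List.length_cons]
      rw [if_pos (by simp [hc]), List.replicate_succ', List.append_assoc]
      rfl

theorem censor_eq (cs : List Char) :
    PySem.Chars.join [' ']
      ((PySem.Chars.splitOn cs [' ']).map (fun seg => List.replicate seg.length 'X')) =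
    censorGo cs := by
  rw [splitOn_eq_splitAux, join_splitAux]
  simp

-- ===== VERDICT (by name: the statement is the Claim_ definition above) =====
theorem censor_spec : Claim_equal_censor := by
  intro word _
  unfold Spec_censor censor censor_alt
  rw [censor_eq]
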